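-- pv_equiv track=rewrite | github.com/clean-code-craft-tcq-2/tdd-buckets-Shivam6033 | main.py | get_ranges_count
-- ===== SOURCE A (Python) =====
-- def get_ranges_count(sublist, items_count_mapper):
--     string = ""
--     for sub_list in sublist:
--         summation = 0
--         if len(sub_list) > 1:
--             string = string + f"{sub_list[0]}-{sub_list[-1]}"
--             for items in range(sub_list[0], sub_list[-1] + 1):
--                 summation = summation + items_count_mapper[items]
--             string = string + f" : {summation}\n"
--     return string
-- ===== SOURCE B (Python) =====
-- def get_ranges_count(sublist, items_count_mapper):
--     keys = sorted(items_count_mapper)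
--     cum = {}
--     running = 0
--     for k in keys:
--         running += items_count_mapper[k]
--         cum[k] = running
--     lines = []
--     for sub in sublist:
--         if len(sub) > 1:
--             lo, hi = sub[0], sub[-1]
--             if lo <= hi:
--                 total = cum[hi] - cum[lo] + items_count_mapper[lo]
--             else:
--                 total = 0
--             lines.append(f"{lo}-{hi} : {total}\n")
--     return "".join(lines)
-- ===== Notes on version B (the rewrite author's own statement) =====
-- stated objective: alternative
-- what changed: Instead of walking every integer of each range and looking it up in the dict, B builds a prefix-sum table over the sorted keys once and answers each range in O(1) as cum[hi] - cum[lo] + mapper[lo]; lines are collected in a list and joined instead of repeated string concatenation.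
import Mathlib
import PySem

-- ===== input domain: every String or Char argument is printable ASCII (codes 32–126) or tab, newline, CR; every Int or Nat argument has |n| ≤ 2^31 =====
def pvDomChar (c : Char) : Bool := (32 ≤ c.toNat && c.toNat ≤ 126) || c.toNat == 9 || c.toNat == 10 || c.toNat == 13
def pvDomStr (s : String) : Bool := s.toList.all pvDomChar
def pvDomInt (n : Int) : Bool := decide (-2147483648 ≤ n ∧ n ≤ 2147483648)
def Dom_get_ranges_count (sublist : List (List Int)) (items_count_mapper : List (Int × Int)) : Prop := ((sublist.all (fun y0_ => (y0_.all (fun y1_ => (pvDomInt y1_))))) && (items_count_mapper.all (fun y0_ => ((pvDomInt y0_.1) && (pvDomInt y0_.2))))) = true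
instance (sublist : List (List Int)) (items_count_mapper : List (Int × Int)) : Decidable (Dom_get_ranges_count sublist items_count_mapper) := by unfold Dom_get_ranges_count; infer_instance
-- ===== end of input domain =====

-- B replaces A's per-integer walk of each range by a prefix-sum table over the sorted dict
-- keys (each range answered by a cum[hi] - cum[lo] + mapper[lo] difference), and the repeated
-- string concatenation by a joined line list.  A's return value only is compared (A mutates nothing).

-- ===== PORT A =====
-- Literal port of A.  items_count_mapper[items] raises KeyError on a missing key; Pre_ below
-- excludes exactly those inputs, so the `getD … 0` defaults here are never reached on Pre_.
def get_ranges_count (sublist : List (List Int)) (items_count_mapper : List (Int × Int)) : String :=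
  let d := PySem.Dict.ofList items_count_mapper
  sublist.foldl (fun string sub_list =>
    if sub_list.length > 1 then
      let first := (PySem.List.pyGet? sub_list 0).getD 0      -- sub_list[0], in range since len > 1
      let last := (PySem.List.pyGet? sub_list (-1)).getD 0    -- sub_list[-1], in range since len > 1
      let string := string ++ (PySem.Int.toStr first ++ "-" ++ PySem.Int.toStr last)
      let summation := (PySem.List.pyRange first (last + 1) 1).foldl
        (fun summation items => summation + d.getD items 0) 0
      string ++ (" : " ++ PySem.Int.toStr summation ++ "\n")
    else string) ""

-- ===== PORT B =====
-- Literal port of Source B: cumulative sums over the sorted keys, then each qualifying range is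
-- answered by cum[hi] - cum[lo] + mapper[lo] (0 for an empty range); lines are joined at the end.
def get_ranges_count_alt (sublist : List (List Int)) (items_count_mapper : List (Int × Int)) : String :=
  let d := PySem.Dict.ofList items_count_mapper
  let keys := PySem.List.sorted d.keys (fun k => k) false
  let cumr := keys.foldl (fun (acc : PySem.Dict Int Int × Int) k =>
      let running := acc.2 + d.getD k 0
      (acc.1.insert k running, running)) (PySem.Dict.empty, 0)
  let cum := cumr.1
  let lines := sublist.foldl (fun lines sub =>
    if sub.length > 1 then
      let lo := (PySem.List.pyGet? sub 0).getD 0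
      let hi := (PySem.List.pyGet? sub (-1)).getD 0
      let total := if lo ≤ hi then cum.getD hi 0 - cum.getD lo 0 + d.getD lo 0 else 0
      lines ++ [PySem.Int.toStr lo ++ "-" ++ PySem.Int.toStr hi ++ " : " ++ PySem.Int.toStr total ++ "\n"]
    else lines) ([] : List String)
  PySem.Str.join "" lines

-- ===== PRECONDITION & SPEC =====
-- Pre_ excludes exactly the inputs where A raises KeyError: some qualifying range contains an
-- integer that is not a key of the mapper.  Coverage of [first, last] by the (distinct) dict
-- keys is stated as a count so it is checkable without enumerating the range.
def Pre_get_ranges_count (sublist : List (List Int)) (items_count_mapper : List (Int × Int)) : Prop :=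
  ∀ sub ∈ sublist, 1 < sub.length →
    (((PySem.List.pyGet? sub (-1)).getD 0 + 1 - (PySem.List.pyGet? sub 0).getD 0).toNat
      ≤ (PySem.Dict.ofList items_count_mapper).keys.countP
          (fun k => decide ((PySem.List.pyGet? sub 0).getD 0 ≤ k ∧
                            k ≤ (PySem.List.pyGet? sub (-1)).getD 0)))
instance (sublist : List (List Int)) (items_count_mapper : List (Int × Int)) : Decidable (Pre_get_ranges_count sublist items_count_mapper) := by unfold Pre_get_ranges_count; infer_instance

def pvWitness_get_ranges_count : List (List Int) × (List (Int × Int)) := ([[0, 2], [5]], [(0, 1), (1, 2), (2, 3)])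

def Spec_get_ranges_count (sublist : List (List Int)) (items_count_mapper : List (Int × Int)) (out : String) : Prop := out = get_ranges_count_alt sublist items_count_mapper
instance (sublist : List (List Int)) (items_count_mapper : List (Int × Int)) (out : String) : Decidable (Spec_get_ranges_count sublist items_count_mapper out) := by unfold Spec_get_ranges_count; infer_instance

-- ===== CLAIM (what is proved, stated in full; the proofs are below) =====
def Claim_equal_get_ranges_count : Prop := ∀ (sublist : List (List Int)) (items_count_mapper : List (Int × Int)), Dom_get_ranges_count sublist items_count_mapper → Pre_get_ranges_count sublist items_count_mapper → Spec_get_ranges_count sublist items_count_mapper (get_ranges_count sublist items_count_mapper)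

-- ===== LEMMAS AND PROOFS =====

lemma pv_join_empty_cons (s : String) (l : List String) :
    PySem.Str.join "" (s :: l) = s ++ PySem.Str.join "" l := by
  cases l with
  | nil => simp [PySem.Str.join, PySem.Chars.join_singleton, PySem.Chars.join_nil]
  | cons t ts => simp [PySem.Str.join, PySem.Chars.join_cons_cons]

-- a count-based coverage bound over a duplicate-free key list means the whole range is present
lemma pv_cover (keys : List Int) (hnd : keys.Nodup) (lo hi : Int)
    (h : (hi + 1 - lo).toNat ≤ keys.countP (fun k => decide (lo ≤ k ∧ k ≤ hi))) :
    ∀ k ∈ PySem.List.pyRange lo (hi + 1) 1, k ∈ keys := by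
  have hFsub : keys.filter (fun k => decide (lo ≤ k ∧ k ≤ hi)) ⊆ PySem.List.pyRange lo (hi + 1) 1 := by
    intro k hk
    have := List.of_mem_filter hk
    rw [PySem.List.mem_pyRange_one]
    simp only [decide_eq_true_eq] at this
    omega
  have hsp := List.subperm_of_subset (hnd.filter _) hFsub
  have hlen : (PySem.List.pyRange lo (hi + 1) 1).length
      ≤ (keys.filter (fun k => decide (lo ≤ k ∧ k ≤ hi))).length := by
    rw [PySem.List.length_pyRange_one]
    simpa [List.countP_eq_length_filter] using h
  have hperm := hsp.perm_of_length_le hlen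
  intro k hk
  exact List.mem_of_mem_filter (hperm.mem_iff.mpr hk)

-- the prefix-sum fold leaves keys it never touches unchanged
lemma pv_fold_getD_of_not_mem (f : Int → Int) (k0 : Int) :
    ∀ (T : List Int) (dc : PySem.Dict Int Int) (r : Int), k0 ∉ T →
      ((T.foldl (fun (acc : PySem.Dict Int Int × Int) k =>
          let running := acc.2 + f k
          (acc.1.insert k running, running)) (dc, r)).1).getD k0 0 = dc.getD k0 0 := by
  intro T
  induction T with
  | nil => intro dc r _; rfl
  | cons x T ih =>
    intro dc r hk
    have hx : k0 ≠ x := fun h => hk (h ▸ List.mem_cons_self)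
    have hT : k0 ∉ T := fun h => hk (List.mem_cons_of_mem _ h)
    simp only [List.foldl_cons]
    rw [ih _ _ hT, PySem.Dict.getD_insert_of_ne _ _ _ hx]

-- value stored by the prefix-sum fold at a key of a duplicate-free list
lemma pv_fold_getD_of_mem (f : Int → Int) (k0 : Int) :
    ∀ (S : List Int) (dc : PySem.Dict Int Int) (r : Int), S.Nodup → k0 ∈ S →
      ((S.foldl (fun (acc : PySem.Dict Int Int × Int) k =>
          let running := acc.2 + f k
          (acc.1.insert k running, running)) (dc, r)).1).getD k0 0
        = r + ((S.takeWhile (fun j => decide (j ≠ k0))).map f).sum + f k0 := by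
  intro S
  induction S with
  | nil => intro _ _ _ h; exact absurd h (List.not_mem_nil)
  | cons x T ih =>
    intro dc r hnd hmem
    have hxT : x ∉ T := (List.nodup_cons.mp hnd).1
    have hndT : T.Nodup := (List.nodup_cons.mp hnd).2
    by_cases hx : k0 = x
    · subst hx
      have hk0T : k0 ∉ T := hxT
      simp only [List.foldl_cons]
      rw [pv_fold_getD_of_not_mem f k0 T _ _ hk0T, PySem.Dict.getD_insert_self]
      simp
    · have hk0T : k0 ∈ T := by
        rcases List.mem_cons.mp hmem with h | h
        · exact absurd h hx
        · exact h
      have hxk : x ≠ k0 := fun h => hx h.symm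
      simp only [List.foldl_cons]
      rw [ih _ _ hndT hk0T]
      simp only [List.takeWhile_cons]
      rw [if_pos (by simpa using hxk)]
      simp only [List.map_cons, List.sum_cons]
      ring

-- in a strictly increasing list, the prefix before key k0 is exactly the elements below k0
lemma pv_takeWhile_sorted (k0 : Int) :
    ∀ (S : List Int), S.Pairwise (· < ·) → k0 ∈ S →
      S.takeWhile (fun j => decide (j ≠ k0)) = S.filter (fun j => decide (j < k0)) := by
  intro S
  induction S with
  | nil => intro _ h; exact absurd h (List.not_mem_nil)
  | cons x T ih =>
    intro hpw hmem
    have hx : ∀ j ∈ T, x < j := (List.pairwise_cons.mp hpw).1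
    have hT : T.Pairwise (· < ·) := (List.pairwise_cons.mp hpw).2
    by_cases hxk : x = k0
    · subst hxk
      have hTnil : T.filter (fun j => decide (j < x)) = [] := by
        rw [List.filter_eq_nil_iff]
        intro j hj
        have := hx j hj
        simp only [decide_eq_true_eq]
        omega
      simp [hTnil]
    · have hk0T : k0 ∈ T := by
        rcases List.mem_cons.mp hmem with h | h
        · exact absurd h.symm hxk
        · exact h
      have hxlt : x < k0 := hx k0 hk0T
      simp only [List.takeWhile_cons, List.filter_cons]
      rw [if_pos (by simpa using hxk), if_pos (by simpa using hxlt), ih hT hk0T]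

-- a sum over a filter by a disjunction of disjoint tests splits
lemma pv_sum_filter_split (f : Int → Int) (p q : Int → Bool)
    (hdisj : ∀ x, ¬(p x = true ∧ q x = true)) :
    ∀ (l : List Int),
      ((l.filter (fun x => p x || q x)).map f).sum
        = ((l.filter p).map f).sum + ((l.filter q).map f).sum := by
  intro l
  induction l with
  | nil => simp
  | cons x t ih =>
    by_cases hp : p x = true
    · have hq : q x = false := by
        by_cases h : q x = true
        · exact absurd ⟨hp, h⟩ (hdisj x)
        · exact Bool.eq_false_iff.mpr h
      simp only [List.filter_cons, hp, hq, Bool.true_or, if_pos, List.map_cons, List.sum_cons,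
        Bool.false_eq_true, if_false, ih]
      ring
    · have hp' : p x = false := Bool.eq_false_iff.mpr hp
      by_cases hq : q x = true
      · simp only [List.filter_cons, hp', hq, Bool.false_or, if_pos, List.map_cons,
          List.sum_cons, Bool.false_eq_true, if_false, ih]
        ring
      · have hq' : q x = false := Bool.eq_false_iff.mpr hq
        simp [hp', hq', ih]

-- A's inner per-integer loop equals B's prefix-sum expression, given key coverage.
lemma pv_inner_sum (m : List (Int × Int)) (lo hi : Int)
    (hcov : ∀ k ∈ PySem.List.pyRange lo (hi + 1) 1,
      (PySem.Dict.ofList m).contains k = true) :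
    (PySem.List.pyRange lo (hi + 1) 1).foldl
        (fun s k => s + (PySem.Dict.ofList m).getD k 0) 0
      = (if lo ≤ hi then
          (((PySem.List.sorted (PySem.Dict.ofList m).keys (fun k => k) false).foldl
              (fun (acc : PySem.Dict Int Int × Int) k =>
                let running := acc.2 + (PySem.Dict.ofList m).getD k 0
                (acc.1.insert k running, running)) (PySem.Dict.empty, 0)).1).getD hi 0
          - (((PySem.List.sorted (PySem.Dict.ofList m).keys (fun k => k) false).foldl
              (fun (acc : PySem.Dict Int Int × Int) k =>
                let running := acc.2 + (PySem.Dict.ofList m).getD k 0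
                (acc.1.insert k running, running)) (PySem.Dict.empty, 0)).1).getD lo 0
          + (PySem.Dict.ofList m).getD lo 0
        else 0) := by
  set d := PySem.Dict.ofList m with hd
  set f : Int → Int := fun k => d.getD k 0 with hf
  set S := PySem.List.sorted d.keys (fun k => k) false with hS
  by_cases hlohi : lo ≤ hi
  · rw [if_pos hlohi]
    -- facts about S
    have hperm : S.Perm d.keys := PySem.List.sorted_perm d.keys (fun k => k) false
    have hSnd : S.Nodup := hperm.nodup_iff.mpr (PySem.Dict.nodup_keys_ofList m)
    have hSle : S.Pairwise (fun a b => a ≤ b) := PySem.List.sorted_pairwise d.keys (fun k => k)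
    have hSlt : S.Pairwise (· < ·) :=
      (hSle.and hSnd).imp (fun h => lt_of_le_of_ne h.1 h.2)
    have hmemS : ∀ k, lo ≤ k → k ≤ hi → k ∈ S := by
      intro k h1 h2
      have hk : k ∈ PySem.List.pyRange lo (hi + 1) 1 :=
        PySem.List.mem_pyRange_one.mpr ⟨h1, by omega⟩
      have := (PySem.Dict.contains_iff_mem_keys d k).mp (hcov k hk)
      exact (PySem.List.mem_sorted d.keys (fun k => k) false k).mpr this
    have hloS : lo ∈ S := hmemS lo le_rfl hlohi
    have hhiS : hi ∈ S := hmemS hi hlohi le_rfl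
    -- cum values
    have hcumhi := pv_fold_getD_of_mem f hi S PySem.Dict.empty 0 hSnd hhiS
    have hcumlo := pv_fold_getD_of_mem f lo S PySem.Dict.empty 0 hSnd hloS
    rw [pv_takeWhile_sorted hi S hSlt hhiS] at hcumhi
    rw [pv_takeWhile_sorted lo S hSlt hloS] at hcumlo
    rw [hcumhi, hcumlo]
    -- split the < hi prefix at lo
    have hsplit : ((S.filter (fun j => decide (j < hi))).map f).sum
        = ((S.filter (fun j => decide (j < lo))).map f).sum
          + ((S.filter (fun j => decide (lo ≤ j ∧ j < hi))).map f).sum := by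
      have hcongr : S.filter (fun j => decide (j < hi))
          = S.filter (fun j => decide (j < lo) || decide (lo ≤ j ∧ j < hi)) := by
        refine List.filter_congr (fun j _ => ?_)
        by_cases h1 : j < lo <;> by_cases h2 : j < hi <;> simp [h1, h2] <;> omega
      rw [hcongr]
      exact pv_sum_filter_split f _ _ (fun x => by
        intro ⟨h1, h2⟩
        simp only [decide_eq_true_eq] at h1 h2
        omega) S
    -- the middle block is exactly the range below hi
    have hmid : ((S.filter (fun j => decide (lo ≤ j ∧ j < hi))).map f).sum
        = ((PySem.List.pyRange lo hi 1).map f).sum := by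
      have hp : (S.filter (fun j => decide (lo ≤ j ∧ j < hi))).Perm (PySem.List.pyRange lo hi 1) := by
        rw [List.perm_ext_iff_of_nodup (hSnd.filter _) (PySem.List.nodup_pyRange_one lo hi)]
        intro j
        constructor
        · intro hj
          have := List.of_mem_filter hj
          simp only [decide_eq_true_eq] at this
          exact PySem.List.mem_pyRange_one.mpr this
        · intro hj
          have := PySem.List.mem_pyRange_one.mp hj
          exact List.mem_filter.mpr ⟨hmemS j this.1 (by omega), by simp only [decide_eq_true_eq]; exact this⟩
      rw [(hp.map f).sum_eq]
    -- A's loop as a sum over the range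
    rw [PySem.List.pyRange_one_succ_right hlohi, List.foldl_append]
    simp only [List.foldl_cons, List.foldl_nil]
    rw [PySem.List.foldl_add (PySem.List.pyRange lo hi 1) f 0]
    rw [hsplit, hmid]
    ring
  · rw [if_neg hlohi]
    rw [PySem.List.pyRange_one_eq_nil (by omega)]
    rfl

-- A's string-accumulating fold, for a step of the shape 'if c then (s ++ p) ++ q else s'.
lemma pv_foldA (c : List Int → Prop) [DecidablePred c] (p q : List Int → String) :
    ∀ (L : List (List Int)) (init : String),
      L.foldl (fun s sub => if c sub then (s ++ p sub) ++ q sub else s) init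
        = init ++ PySem.Str.join ""
            ((L.filter (fun x => decide (c x))).map (fun sub => p sub ++ q sub)) := by
  intro L
  induction L with
  | nil => intro init; simp [PySem.Str.join, PySem.Chars.join_nil]
  | cons x t ih =>
    intro init
    by_cases h : c x
    · simp only [List.foldl_cons, List.filter_cons, decide_eq_true_eq, h,
        if_pos, List.map_cons]
      rw [ih, pv_join_empty_cons]
      simp [String.append_assoc]
    · simp only [List.foldl_cons, List.filter_cons, decide_eq_true_eq, h]
      simpa using ih init

-- ===== VERDICT (by name: the statement is the Claim_ definition above) =====
theorem get_ranges_count_spec : Claim_equal_get_ranges_count := by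
  intro sublist m _ hpre
  unfold Spec_get_ranges_count get_ranges_count get_ranges_count_alt
  simp only []
  rw [pv_foldA (fun sub => sub.length > 1)
        (fun sub => PySem.Int.toStr ((PySem.List.pyGet? sub 0).getD 0) ++ "-"
          ++ PySem.Int.toStr ((PySem.List.pyGet? sub (-1)).getD 0))
        (fun sub => " : " ++ PySem.Int.toStr
            ((PySem.List.pyRange ((PySem.List.pyGet? sub 0).getD 0)
                (((PySem.List.pyGet? sub (-1)).getD 0) + 1) 1).foldl
              (fun s k => s + (PySem.Dict.ofList m).getD k 0) 0) ++ "\n"),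
      PySem.List.foldl_append_ite (fun sub : List Int => sub.length > 1)]
  simp only [List.nil_append, String.empty_append]
  congr 1
  refine List.map_congr_left (fun sub hsub => ?_)
  have hmem : sub ∈ sublist := List.mem_of_mem_filter hsub
  have hlen : 1 < sub.length := by
    have := List.of_mem_filter hsub
    simpa using this
  have hcov : ∀ k ∈ PySem.List.pyRange ((PySem.List.pyGet? sub 0).getD 0)
      (((PySem.List.pyGet? sub (-1)).getD 0) + 1) 1,
      (PySem.Dict.ofList m).contains k = true := by
    intro k hk
    rw [PySem.Dict.contains_iff_mem_keys]
    exact pv_cover _ (PySem.Dict.nodup_keys_ofList m) _ _ (hpre sub hmem hlen) k hk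
  rw [pv_inner_sum m _ _ hcov]
  simp [String.append_assoc]
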